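-- pv_equiv track=rewrite | github.com/webster94/TIL | TIL - 1학기/practices/08월/0824_coding_algorithm/연습5.px.py | euisoo
-- ===== SOURCE A (Python) =====
-- def euisoo(array,pattern):
--     i,j = 0,0
--     M = len(array)
--     N = len(pattern)
--     while (i < M and j < N):
--         if array[i] != pattern[j]:
--             i = i-j
--             j = -1
--         i += 1
--         j += 1
--     if j == N:
--         return i - N
--     else:
--         return -1
-- ===== SOURCE B (Python) =====
-- def euisoo(array, pattern):
--     # Idiomatic: delegate to str.find, which returns the first occurrence
--     # index of pattern in array, or -1 if absent (0 for the empty pattern).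
--     return array.find(pattern)
-- ===== Notes on version B (the rewrite author's own statement) =====
-- stated objective: idiomatic
-- what changed: Replaced the hand-written backtracking while-loop scan with a single call to str.find (CPython's C-implemented two-way string search), which returns exactly the first-occurrence index or -1.
import Mathlib
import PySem

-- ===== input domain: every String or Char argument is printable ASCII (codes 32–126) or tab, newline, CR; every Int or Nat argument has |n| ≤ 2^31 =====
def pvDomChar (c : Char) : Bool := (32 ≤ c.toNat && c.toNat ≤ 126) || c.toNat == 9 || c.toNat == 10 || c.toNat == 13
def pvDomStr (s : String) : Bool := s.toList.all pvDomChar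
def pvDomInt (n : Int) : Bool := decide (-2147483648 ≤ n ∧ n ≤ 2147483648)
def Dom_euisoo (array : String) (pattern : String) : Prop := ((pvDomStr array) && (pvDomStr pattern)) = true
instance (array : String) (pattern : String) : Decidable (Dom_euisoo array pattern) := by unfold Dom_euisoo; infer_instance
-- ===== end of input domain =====

-- B replaces A's hand-written backtracking scan by the library first-occurrence
-- search str.find (same value on every input); objective: idiomatic.

-- ===== PORT A =====
-- the while-loop of A: on mismatch the Python does i = i-j; j = -1; i += 1; j += 1,
-- i.e. net i := i-j+1, j := 0 (i, j never negative at the loop head, so Nat state)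
def euisooGo (s p : List Char) (M N i j : Nat) : Int :=
  if _h : i < M ∧ j < N then
    if PySem.List.pyGet? s (i : Int) ≠ PySem.List.pyGet? p (j : Int) then
      euisooGo s p M N (i - j + 1) 0
    else
      euisooGo s p M N (i + 1) (j + 1)
  else if j = N then (i : Int) - (N : Int) else -1
termination_by (M - (i - j)) * (N + 1) + (N - j)
decreasing_by
  · have h4 : M - (i - j) = (M - (i - j + 1 - 0)) + 1 := by omega
    rw [h4, Nat.add_mul, one_mul]
    omega
  · have h : i + 1 - (j + 1) = i - j := by omega
    rw [h]
    omega

def euisoo (array : String) (pattern : String) : Int :=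
  euisooGo array.toList pattern.toList array.toList.length pattern.toList.length 0 0

-- ===== PORT B =====
def euisoo_alt (array : String) (pattern : String) : Int :=
  PySem.Str.find array pattern

-- ===== PRECONDITION & SPEC =====
def Spec_euisoo (array : String) (pattern : String) (out : Int) : Prop := out = euisoo_alt array pattern
instance (array : String) (pattern : String) (out : Int) : Decidable (Spec_euisoo array pattern out) := by unfold Spec_euisoo; infer_instance

-- ===== CLAIM (what is proved, stated in full; the proofs are below) =====
def Claim_equal_euisoo : Prop := ∀ (array : String) (pattern : String), Dom_euisoo array pattern → Spec_euisoo array pattern (euisoo array pattern)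

-- ===== LEMMAS AND PROOFS =====

-- ===== VERDICT (by name: the statement is the Claim_ definition above) =====
-- the loop invariant: p.take j matches s at position i-j, and no full occurrence earlier
theorem euisooGo_spec (s p : List Char) (i j : Nat)
    (hji : j ≤ i) (hiM : i ≤ s.length) (hjN : j ≤ p.length)
    (hpre : p.take j <+: s.drop (i - j))
    (hmin : ∀ k, k < i - j → ¬ p <+: s.drop k) :
    euisooGo s p s.length p.length i j = PySem.Chars.find s p := by
  rw [euisooGo]
  split
  · rename_i hg
    obtain ⟨hiM', hjN'⟩ := hg
    split
    · -- mismatch: restart at i-j+1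
      rename_i hne
      apply euisooGo_spec s p (i - j + 1) 0 (by omega) (by omega) (by omega)
      · exact List.nil_prefix
      · intro k hk
        rcases Nat.lt_or_ge k (i - j) with h | h
        · exact hmin k h
        · have hk' : k = i - j := by omega
          subst hk'
          intro hp
          apply hne
          obtain ⟨r, hr⟩ := hp
          have e1 : (s.drop (i - j))[j]? = p[j]? := by
            rw [← hr, List.getElem?_append_left hjN']
          have e2 : (s.drop (i - j))[j]? = s[i]? := by
            rw [List.getElem?_drop]; congr 1; omega
          simp only [PySem.List.pyGet?_natCast]
          rw [← e1, e2]
    · -- match: advance both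
      rename_i hne
      have hc : s[i]? = p[j]? := by
        simpa only [PySem.List.pyGet?_natCast, not_not] using hne
      have heq : i + 1 - (j + 1) = i - j := by omega
      apply euisooGo_spec s p (i + 1) (j + 1) (by omega) (by omega) (by omega)
      · rw [heq]
        obtain ⟨r, hr⟩ := hpre
        obtain ⟨c, hcj⟩ : ∃ c, p[j]? = some c := ⟨p[j], List.getElem?_eq_getElem hjN'⟩
        have hlen : (p.take j).length = j := by simp; omega
        have hr0 : r[0]? = some c := by
          have h2 : (s.drop (i - j))[j]? = s[i]? := by
            rw [List.getElem?_drop]; congr 1; omega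
          have h3 : (p.take j ++ r)[j]? = r[0]? := by
            rw [List.getElem?_append_right (by omega), hlen, Nat.sub_self]
          rw [hr, h2, hc, hcj] at h3
          exact h3.symm
        cases r with
        | nil => simp at hr0
        | cons a t =>
          simp only [List.getElem?_cons_zero, Option.some.injEq] at hr0
          subst hr0
          refine ⟨t, ?_⟩
          rw [← hr, List.take_add_one, hcj]
          simp
      · rw [heq]; exact hmin
  · rename_i hg
    split
    · -- j = p.length : full match found at i - p.length
      rename_i hjeq
      subst hjeq
      have hocc : p <+: s.drop (i - p.length) := by
        simpa [List.take_length] using hpre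
      have hinf : p <:+: s := hocc.isInfix.trans (List.drop_suffix _ _).isInfix
      have h0 : 0 ≤ PySem.Chars.find s p := (PySem.Chars.find_nonneg_iff s p).mpr hinf
      obtain ⟨hf1, hf2⟩ := PySem.Chars.find_spec h0
      have e1 : ¬ (PySem.Chars.find s p).toNat < i - p.length := fun h => hmin _ h hf1
      have e2 : ¬ i - p.length < (PySem.Chars.find s p).toNat := fun h => hf2 _ h hocc
      have := Int.toNat_of_nonneg h0
      omega
    · -- loop exhausted with a partial match: no occurrence at all
      rename_i hjne
      have hjlt : j < p.length := by omega
      have hieq : i = s.length := by omega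
      symm
      rw [PySem.Chars.find_eq_neg_one_iff]
      intro hinf
      have hIn : PySem.Chars.isIn p s = true := (PySem.Chars.isIn_iff_infix p s).mpr hinf
      obtain ⟨k, hk⟩ := (PySem.Chars.exists_prefix_drop_iff_isIn _ _).mpr hIn
      rcases Nat.lt_or_ge k (i - j) with h | h
      · exact hmin k h hk
      · have := hk.length_le
        rw [List.length_drop] at this
        omega
termination_by (s.length - (i - j)) * (p.length + 1) + (p.length - j)
decreasing_by
  · have h : i + 1 - (j + 1) = i - j := by omega
    rw [h]
    omega
  · have h4 : s.length - (i - j) = (s.length - (i - j + 1 - 0)) + 1 := by omega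
    rw [h4, Nat.add_mul, one_mul]
    omega

theorem euisoo_spec : Claim_equal_euisoo := by
  intro array pattern _
  unfold Spec_euisoo euisoo euisoo_alt
  simp only [PySem.Str.find_eq]
  apply euisooGo_spec array.toList pattern.toList 0 0 (by omega) (by omega) (by omega)
  · exact List.nil_prefix
  · intro k hk
    exact absurd hk (Nat.not_lt_zero k)
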